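-- pv_equiv track=rewrite | github.com/matthewsj/subsets | SubsetFinder.py | LargestSupersets
-- ===== SOURCE A (Python) =====
-- from collections import defaultdict, deque
-- import heapq
--
-- def LargestSupersets(setlists):
--   '''Computes, for each item in the input, the largest superset in the same input.
--
-- setlists: A list of lists, each of which represents a set of items. Items must be hashable.
--   '''
--   # First, build a table that maps each element in any input setlist to a list of records
--   # of the form (-size of setlist, index of setlist), one for each setlist that contains
--   # the corresponding element
--   element_to_entries = defaultdict(list)
--   for idx, setlist in enumerate(setlists):
--     entry = (-len(setlist), idx)  # cheesy way to make an entry that sorts properly -- largest first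
--     for element in setlist:
--       element_to_entries[element].append(entry)
--
--   # Within each entry, sort so that larger items come first, with ties broken arbitrarily by
--   # the set's index
--   for entries in element_to_entries.values():
--     entries.sort()
--
--   # Now build up the output by going over each setlist and walking over the entries list for
--   # each element in the setlist. Since the entries list for each element is sorted largest to
--   # smallest, the first entry we find that is in every entry set we pulled will be the largest
--   # element of the input that contains each item in this setlist. We are guaranteed to eventually
--   # find such an element because, at the very least, the item we're iterating on itself is in
--   # each entries list.
--   output = []
--   for idx, setlist in enumerate(setlists):
--     num_elements = len(setlist)
--     buckets = [element_to_entries[element] for element in setlist]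
--
--     # We implement the search for an item that appears in every list by maintaining a heap and
--     # a queue. We have the invariants that:
--     #   1. The queue contains the n smallest items across all the buckets, in order
--     #   2. The heap contains the smallest item from each bucket that has not already passed through
--     #        the queue.
--     smallest_entries_heap = []
--     smallest_entries_deque = deque([], num_elements)
--     for bucket_idx, bucket in enumerate(buckets):
--       smallest_entries_heap.append((bucket[0], bucket_idx, 0))
--     heapq.heapify(smallest_entries_heap)
--
--     while (len(smallest_entries_deque) < num_elements or
--            smallest_entries_deque[0] != smallest_entries_deque[num_elements - 1]):
--       # First extract the next smallest entry in the queue ...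
--       (smallest_entry, bucket_idx, element_within_bucket_idx) = heapq.heappop(smallest_entries_heap)
--       smallest_entries_deque.append(smallest_entry)
--
--       # ... then add the next-smallest item from the bucket that we just removed an element from
--       if element_within_bucket_idx + 1 < len(buckets[bucket_idx]):
--         new_element = buckets[bucket_idx][element_within_bucket_idx + 1]
--         heapq.heappush(smallest_entries_heap, (new_element, bucket_idx, element_within_bucket_idx + 1))
--
--     output.append((idx, smallest_entries_deque[0][1]))
--
--   return output
-- ===== SOURCE B (Python) =====
-- from collections import defaultdict, Counter
--
-- def LargestSupersets(setlists):
--   # Per-element entry counters instead of sorted lists + heap/deque k-way merge: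
--   # for each setlist, sum the counters of its elements and take the minimal
--   # (-size, index) entry whose total count reaches the setlist's length.
--   element_to_counts = defaultdict(Counter)
--   for idx, setlist in enumerate(setlists):
--     entry = (-len(setlist), idx)
--     for element in setlist:
--       element_to_counts[element][entry] += 1
--
--   output = []
--   for idx, setlist in enumerate(setlists):
--     n = len(setlist)
--     total = Counter()
--     for element in setlist:
--       total.update(element_to_counts[element])
--     best = min(e for e, c in total.items() if c >= n)
--     output.append((idx, best[1]))
--   return output
-- ===== Notes on version B (the rewrite author's own statement) =====
-- stated objective: simpler
-- what changed: Replaces A's per-setlist heap + bounded-deque k-way merge over sorted per-element entry lists by per-element entry Counters that are summed once per setlist, after which the answer is min() over the entries whose total count reaches the setlist's length.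
import Mathlib
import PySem

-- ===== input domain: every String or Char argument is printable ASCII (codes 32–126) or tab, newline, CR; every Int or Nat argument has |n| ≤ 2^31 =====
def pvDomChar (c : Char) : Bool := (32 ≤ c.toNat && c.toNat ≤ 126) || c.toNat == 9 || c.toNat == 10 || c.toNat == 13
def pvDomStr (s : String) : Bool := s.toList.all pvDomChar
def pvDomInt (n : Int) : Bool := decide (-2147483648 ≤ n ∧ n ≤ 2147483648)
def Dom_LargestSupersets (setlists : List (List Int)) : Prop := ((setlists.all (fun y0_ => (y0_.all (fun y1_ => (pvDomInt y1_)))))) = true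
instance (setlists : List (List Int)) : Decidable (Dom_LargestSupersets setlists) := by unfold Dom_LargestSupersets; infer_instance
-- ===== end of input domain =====

-- B replaces A's per-setlist heap + bounded-deque k-way merge over sorted entry lists by
-- per-element entry Counters summed once per setlist, picking the minimal entry whose
-- total count reaches the setlist's length (objective: simpler).

-- ===== PORT A =====
-- Python compares the (−size, index) entry tuples and the (entry, bucket, pos) heap
-- items lexicographically; these are those comparisons, written out.
def pvELtb (a b : Int × Int) : Bool := a.1 < b.1 || (a.1 == b.1 && a.2 < b.2)

def pvTLtb (a b : (Int × Int) × Int × Int) : Bool :=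
  pvELtb a.1 b.1 || (a.1 == b.1 && (a.2.1 < b.2.1 || (a.2.1 == b.2.1 && a.2.2 < b.2.2)))

-- Model of the heapq heap: a list kept sorted ascending; heappush = ordered insert,
-- heapify = repeated insert, heappop = take the head.  Exact for this program: heapq
-- always pops the least item, and all items this program stores are pairwise distinct
-- (their bucket indices differ), so the sequence of pops is fully determined.
def pvHeapPush (t : (Int × Int) × Int × Int) :
    List ((Int × Int) × Int × Int) → List ((Int × Int) × Int × Int)
  | [] => [t]
  | x :: xs => if pvTLtb t x then t :: x :: xs else x :: pvHeapPush t xs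

def pvHeapify (l : List ((Int × Int) × Int × Int)) : List ((Int × Int) × Int × Int) :=
  l.foldl (fun h t => pvHeapPush t h) []

-- deque(maxlen = n): append right, drop from the left when over capacity
def pvDequeAppend (n : Nat) (dq : List (Int × Int)) (e : Int × Int) : List (Int × Int) :=
  let d := dq ++ [e]
  if n < d.length then d.tail else d

-- the while loop, by fuel (one unit per heappop; the caller supplies fuel exceeding the
-- total number of heap items ever available, which bounds the number of iterations)
def pvMergeLoop (buckets : List (List (Int × Int))) (n : Nat) :
    Nat → List ((Int × Int) × Int × Int) → List (Int × Int) → List (Int × Int)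
  | 0, _, dq => dq
  | _ + 1, [], dq => dq   -- empty heap: heappop would raise IndexError; unreachable under Pre_
  | fuel + 1, t :: rest, dq =>
    if dq.length < n ∨ PySem.List.pyGet? dq 0 ≠ PySem.List.pyGet? dq ((n : Int) - 1) then
      let dq' := pvDequeAppend n dq t.1
      let bucket := PySem.List.pyGetD buckets t.2.1 []
      let heap' := if t.2.2 + 1 < (bucket.length : Int) then
          pvHeapPush (PySem.List.pyGetD bucket (t.2.2 + 1) (0, 0), t.2.1, t.2.2 + 1) rest
        else rest
      pvMergeLoop buckets n fuel heap' dq'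
    else dq

-- element_to_entries after the append loop (defaultdict(list); append = modify with [])
def pvTableA (setlists : List (List Int)) : PySem.Dict Int (List (Int × Int)) :=
  (PySem.List.enumerate setlists).foldl
    (fun d p => p.2.foldl
      (fun d element => d.modify element [] (fun l => l ++ [(-(p.2.length : Int), p.1)])) d)
    PySem.Dict.empty

-- 'for entries in element_to_entries.values(): entries.sort()' — each stored list
-- replaced in place by its sorted version
def pvTableASorted (setlists : List (List Int)) : PySem.Dict Int (List (Int × Int)) :=
  (pvTableA setlists).items.foldl
    (fun d q => d.insert q.1 (PySem.List.sorted2 q.2 (·.1) (·.2))) (pvTableA setlists)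

def LargestSupersets (setlists : List (List Int)) : List (Int × Int) :=
  let table := pvTableASorted setlists
  (PySem.List.enumerate setlists).foldl
    (fun output p =>
      let numElements := p.2.length
      let buckets := p.2.map (fun element => table.getD element [])
      let heap0 := (PySem.List.enumerate buckets).map
        (fun q => (PySem.List.pyGetD q.2 0 (0, 0), q.1, (0 : Int)))
      let heap := pvHeapify heap0
      let dq := pvMergeLoop buckets numElements ((buckets.map List.length).sum + 1) heap []
      output ++ [(p.1, (PySem.List.pyGetD dq 0 (0, 0)).2)])
    []

-- ===== PORT B =====
-- element_to_counts: defaultdict(Counter); counts[entry] += 1 = modify with default 0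
def pvTableB (setlists : List (List Int)) : PySem.Dict Int (PySem.Dict (Int × Int) Int) :=
  (PySem.List.enumerate setlists).foldl
    (fun d p => p.2.foldl
      (fun d element => d.modify element PySem.Dict.empty
        (fun c => c.modify (-(p.2.length : Int), p.1) 0 (· + 1))) d)
    PySem.Dict.empty

-- Counter.update: add counts key by key, new keys appended in the argument's order
def pvCounterAdd (t u : PySem.Dict (Int × Int) Int) : PySem.Dict (Int × Int) Int :=
  u.items.foldl (fun t q => t.modify q.1 0 (· + q.2)) t

def LargestSupersets_alt (setlists : List (List Int)) : List (Int × Int) :=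
  let table := pvTableB setlists
  (PySem.List.enumerate setlists).foldl
    (fun output p =>
      let n := p.2.length
      let total := p.2.foldl
        (fun t element => pvCounterAdd t (table.getD element PySem.Dict.empty))
        PySem.Dict.empty
      let cands := (total.items.filter (fun q => (n : Int) ≤ q.2)).map (·.1)
      let best := (PySem.List.min2? cands (·.1) (·.2)).getD (0, 0)
      output ++ [(p.1, best.2)])
    []

-- ===== PRECONDITION & SPEC =====
-- Pre_ excludes inputs containing an empty inner list: there Python A raises IndexError
-- (deque[0] on an empty deque) and Python B raises ValueError (min of an empty sequence).
def Pre_LargestSupersets (setlists : List (List Int)) : Prop :=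
  ∀ L ∈ setlists, L ≠ []
instance (setlists : List (List Int)) : Decidable (Pre_LargestSupersets setlists) := by
  unfold Pre_LargestSupersets; infer_instance

def pvWitness_LargestSupersets : List (List Int) := [[1, 2], [2], [1, 2, 3]]

def Spec_LargestSupersets (setlists : List (List Int)) (out : List (Int × Int)) : Prop :=
  out = LargestSupersets_alt setlists
instance (setlists : List (List Int)) (out : List (Int × Int)) :
    Decidable (Spec_LargestSupersets setlists out) := by
  unfold Spec_LargestSupersets; infer_instance

-- ===== CLAIM (what is proved, stated in full; the proofs are below) =====
def Claim_equal_LargestSupersets : Prop :=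
  ∀ (setlists : List (List Int)), Dom_LargestSupersets setlists →
    Pre_LargestSupersets setlists →
    Spec_LargestSupersets setlists (LargestSupersets setlists)

-- ===== LEMMAS AND PROOFS =====

-- ---- orders ----

-- Prop forms of the two lexicographic comparisons
def pvELe (a b : Int × Int) : Prop := a.1 < b.1 ∨ (a.1 = b.1 ∧ a.2 ≤ b.2)
def pvELt (a b : Int × Int) : Prop := a.1 < b.1 ∨ (a.1 = b.1 ∧ a.2 < b.2)
def pvTLt (a b : (Int × Int) × Int × Int) : Prop :=
  pvELt a.1 b.1 ∨ (a.1 = b.1 ∧ (a.2.1 < b.2.1 ∨ (a.2.1 = b.2.1 ∧ a.2.2 < b.2.2)))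

theorem pvELtb_iff (a b : Int × Int) : pvELtb a b = true ↔ pvELt a b := by
  simp [pvELtb, pvELt]

theorem pvTLtb_iff (a b : (Int × Int) × Int × Int) : pvTLtb a b = true ↔ pvTLt a b := by
  simp [pvTLtb, pvTLt, pvELtb_iff, pvELt, Prod.ext_iff]

theorem pvELt_asymm {a b : Int × Int} (h : pvELt a b) : ¬ pvELt b a := by
  rcases a with ⟨x, y⟩; rcases b with ⟨z, w⟩; simp [pvELt] at *; omega

theorem pvELt_trans {a b c : Int × Int} (h1 : pvELt a b) (h2 : pvELt b c) : pvELt a c := by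
  rcases a with ⟨x, y⟩; rcases b with ⟨z, w⟩; rcases c with ⟨u, v⟩
  simp [pvELt] at *; omega

theorem pvELt_total (a b : Int × Int) : pvELt a b ∨ pvELt b a ∨ a = b := by
  rcases a with ⟨x, y⟩; rcases b with ⟨z, w⟩
  simp [pvELt, Prod.ext_iff]; omega

theorem pvELe_of_not_lt {a b : Int × Int} (h : ¬ pvELt b a) : pvELe a b := by
  rcases a with ⟨x, y⟩; rcases b with ⟨z, w⟩; simp [pvELt, pvELe] at *; omega

theorem pvELe_antisymm {a b : Int × Int} (h1 : pvELe a b) (h2 : pvELe b a) : a = b := by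
  rcases a with ⟨x, y⟩; rcases b with ⟨z, w⟩
  simp [pvELe, Prod.ext_iff] at *; omega

theorem pvELe_trans {a b c : Int × Int} (h1 : pvELe a b) (h2 : pvELe b c) : pvELe a c := by
  rcases a with ⟨x, y⟩; rcases b with ⟨z, w⟩; rcases c with ⟨u, v⟩
  simp [pvELe] at *; omega

theorem pvELe_of_lt {a b : Int × Int} (h : pvELt a b) : pvELe a b := by
  rcases a with ⟨x, y⟩; rcases b with ⟨z, w⟩; simp [pvELt, pvELe] at *; omega

theorem pvELt_of_le_of_lt {a b c : Int × Int} (h1 : pvELe a b) (h2 : pvELt b c) : pvELt a c := by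
  rcases a with ⟨x, y⟩; rcases b with ⟨z, w⟩; rcases c with ⟨u, v⟩
  simp [pvELt, pvELe] at *; omega

theorem pvTLt_asymm {a b : (Int × Int) × Int × Int} (h : pvTLt a b) : ¬ pvTLt b a := by
  rcases a with ⟨⟨x1, x2⟩, x3, x4⟩; rcases b with ⟨⟨y1, y2⟩, y3, y4⟩
  simp [pvTLt, pvELt, Prod.ext_iff] at *; omega

theorem pvTLt_trans {a b c : (Int × Int) × Int × Int} (h1 : pvTLt a b) (h2 : pvTLt b c) :
    pvTLt a c := by
  rcases a with ⟨⟨x1, x2⟩, x3, x4⟩; rcases b with ⟨⟨y1, y2⟩, y3, y4⟩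
  rcases c with ⟨⟨z1, z2⟩, z3, z4⟩
  simp [pvTLt, pvELt, Prod.ext_iff] at *; omega

theorem pvELe_fst_of_pvTLt {a b : (Int × Int) × Int × Int} (h : pvTLt a b) : pvELe a.1 b.1 := by
  rcases a with ⟨⟨x1, x2⟩, x3, x4⟩; rcases b with ⟨⟨y1, y2⟩, y3, y4⟩
  simp only [pvTLt, pvELt, pvELe, Prod.ext_iff] at *
  omega

-- ---- insertion sort by an abstract strict comparison ----

theorem pvInsertBy_perm {α : Type} (before : α → α → Bool) (x : α) (l : List α) :
    (PySem.List.insertBy before x l).Perm (x :: l) := by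
  induction l with
  | nil => simp [PySem.List.insertBy]
  | cons y ys ih =>
    simp only [PySem.List.insertBy]
    split
    · exact List.Perm.refl _
    · exact (ih.cons y).trans (List.Perm.swap x y ys)

theorem pvInsertBy_pairwise {α : Type} (before : α → α → Bool)
    (hasym : ∀ a b, before a b = true → before b a = false)
    (htrans : ∀ a b c, before a b = true → before b c = true → before a c = true)
    (x : α) (l : List α) (hl : l.Pairwise (fun a b => before b a = false)) :
    (PySem.List.insertBy before x l).Pairwise (fun a b => before b a = false) := by
  induction l with
  | nil => simp [PySem.List.insertBy]
  | cons y ys ih =>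
    rcases List.pairwise_cons.mp hl with ⟨hy, hys⟩
    simp only [PySem.List.insertBy]
    split
    · rename_i hxy
      refine List.pairwise_cons.mpr ⟨?_, hl⟩
      intro z hz
      rcases List.mem_cons.mp hz with rfl | hz
      · exact hasym _ _ hxy
      · cases h' : before z x with
        | false => rfl
        | true => exact absurd (htrans _ _ _ h' hxy) (by simp [hy z hz])
    · rename_i hxy
      refine List.pairwise_cons.mpr ⟨?_, ih hys⟩
      intro z hz
      have hz' := (PySem.List.mem_insertBy _ _ _ _).mp hz
      rcases hz' with rfl | hz'
      · simpa using hxy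
      · exact hy z hz'


theorem pvFoldInsertBy_perm {α : Type} (before : α → α → Bool) (l acc : List α) :
    (l.foldl (fun h t => PySem.List.insertBy before t h) acc).Perm (l ++ acc) := by
  induction l generalizing acc with
  | nil => simp
  | cons x xs ih =>
    simp only [List.foldl_cons]
    refine (ih _).trans ?_
    refine (List.Perm.append_left xs (pvInsertBy_perm before x acc)).trans ?_
    simp

theorem pvFoldInsertBy_pairwise {α : Type} (before : α → α → Bool)
    (hasym : ∀ a b, before a b = true → before b a = false)
    (htrans : ∀ a b c, before a b = true → before b c = true → before a c = true)
    (l acc : List α) (hacc : acc.Pairwise (fun a b => before b a = false)) :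
    (l.foldl (fun h t => PySem.List.insertBy before t h) acc).Pairwise
      (fun a b => before b a = false) := by
  induction l generalizing acc with
  | nil => exact hacc
  | cons x xs ih =>
    exact ih _ (pvInsertBy_pairwise before hasym htrans x acc hacc)

theorem pvHeapPush_eq (t : (Int × Int) × Int × Int) (l : List ((Int × Int) × Int × Int)) :
    pvHeapPush t l = PySem.List.insertBy pvTLtb t l := by
  induction l with
  | nil => rfl
  | cons x xs ih => simp only [pvHeapPush, PySem.List.insertBy, ih]

theorem pvTLtb_asymm (a b : (Int × Int) × Int × Int) (h : pvTLtb a b = true) :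
    pvTLtb b a = false := by
  rcases h' : pvTLtb b a with _ | _
  · rfl
  · exact absurd (pvTLtb_iff _ _ |>.mp h') (pvTLt_asymm (pvTLtb_iff _ _ |>.mp h))

theorem pvTLtb_trans (a b c : (Int × Int) × Int × Int) (h1 : pvTLtb a b = true)
    (h2 : pvTLtb b c = true) : pvTLtb a c = true :=
  (pvTLtb_iff _ _).mpr (pvTLt_trans ((pvTLtb_iff _ _).mp h1) ((pvTLtb_iff _ _).mp h2))

theorem pvHeapify_perm (l : List ((Int × Int) × Int × Int)) : (pvHeapify l).Perm l := by
  have h : pvHeapify l = l.foldl (fun h t => PySem.List.insertBy pvTLtb t h) [] := by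
    unfold pvHeapify
    exact PySem.List.foldl_congr_mem _ _ _ _ (fun h t _ => pvHeapPush_eq t h)
  rw [h]
  simpa using pvFoldInsertBy_perm pvTLtb l []

theorem pvHeapify_pairwise (l : List ((Int × Int) × Int × Int)) :
    (pvHeapify l).Pairwise (fun a b => pvTLtb b a = false) := by
  have h : pvHeapify l = l.foldl (fun h t => PySem.List.insertBy pvTLtb t h) [] := by
    unfold pvHeapify
    exact PySem.List.foldl_congr_mem _ _ _ _ (fun h t _ => pvHeapPush_eq t h)
  rw [h]
  exact pvFoldInsertBy_pairwise pvTLtb pvTLtb_asymm pvTLtb_trans l [] (by simp)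


-- ---- the two element tables agree entry-count for entry-count ----

-- weight contributed by one enumerated setlist to the entry e of element a
def pvW (a : Int) (e : Int × Int) (p : Int × List Int) : Nat :=
  if e = (-(p.2.length : Int), p.1) then p.2.count a else 0

theorem pvInnerA (L : List Int) (v : Int × Int) :
    ∀ (d : PySem.Dict Int (List (Int × Int))) (a : Int),
    (L.foldl (fun d x => d.modify x [] (fun l => l ++ [v])) d).getD a [] =
      d.getD a [] ++ List.replicate (L.count a) v := by
  induction L with
  | nil => intro d a; simp
  | cons x xs ih =>
    intro d a
    simp only [List.foldl_cons]
    rw [ih, PySem.Dict.getD_modify]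
    by_cases h : a = x
    · subst h
      simp [List.replicate_succ]
    · simp [h, Ne.symm h]

theorem pvInnerB (L : List Int) (v : Int × Int) :
    ∀ (d : PySem.Dict Int (PySem.Dict (Int × Int) Int)) (a : Int) (e : Int × Int),
    ((L.foldl (fun d x => d.modify x PySem.Dict.empty (fun c => c.modify v 0 (· + 1))) d).getD a
        PySem.Dict.empty).getD e 0 =
      (d.getD a PySem.Dict.empty).getD e 0 + (if e = v then (L.count a : Int) else 0) := by
  induction L with
  | nil => intro d a e; simp
  | cons x xs ih =>
    intro d a e
    simp only [List.foldl_cons]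
    rw [ih, PySem.Dict.getD_modify]
    by_cases h : a = x
    · subst h
      rw [if_pos rfl, PySem.Dict.getD_modify]
      by_cases he : e = v
      · simp [he]
        ring
      · simp [he]
    · simp [h, Ne.symm h]

theorem pvRawCnt (P : List (Int × List Int)) :
    ∀ (d : PySem.Dict Int (List (Int × Int))) (a : Int) (e : Int × Int),
    ((P.foldl (fun d p => p.2.foldl
        (fun d x => d.modify x [] (fun l => l ++ [(-(p.2.length : Int), p.1)])) d) d).getD a
      []).count e =
      ((d.getD a []).count e) + (P.map (pvW a e)).sum := by
  induction P with
  | nil => intro d a e; simp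
  | cons p rest ih =>
    intro d a e
    simp only [List.foldl_cons, List.map_cons, List.sum_cons]
    rw [ih, pvInnerA]
    simp only [List.count_append, List.count_replicate, pvW]
    by_cases h : e = (-(p.2.length : Int), p.1)
    · simp [h]
      omega
    · simp [h, Ne.symm h]

theorem pvCntB (P : List (Int × List Int)) :
    ∀ (d : PySem.Dict Int (PySem.Dict (Int × Int) Int)) (a : Int) (e : Int × Int),
    (((P.foldl (fun d p => p.2.foldl
        (fun d x => d.modify x PySem.Dict.empty
          (fun c => c.modify (-(p.2.length : Int), p.1) 0 (· + 1))) d) d).getD a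
      PySem.Dict.empty).getD e 0) =
      ((d.getD a PySem.Dict.empty).getD e 0) + ((P.map (pvW a e)).sum : Int) := by
  induction P with
  | nil => intro d a e; simp
  | cons p rest ih =>
    intro d a e
    simp only [List.foldl_cons, List.map_cons, List.sum_cons]
    rw [ih, pvInnerB]
    simp only [pvW]
    by_cases h : e = (-(p.2.length : Int), p.1)
    · simp [h]
      ring
    · simp [h]

-- counts agree between A's raw entry lists and B's entry counters
theorem pvTblEq (setlists : List (List Int)) (a : Int) (e : Int × Int) :
    ((pvTableB setlists).getD a PySem.Dict.empty).getD e 0 =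
      (((pvTableA setlists).getD a []).count e : Int) := by
  unfold pvTableA pvTableB
  rw [pvCntB, pvRawCnt]
  simp

-- keys of A's raw table are unique (needed to read its items back)
theorem pvNodupKeysA (setlists : List (List Int)) : (pvTableA setlists).keys.Nodup := by
  unfold pvTableA
  generalize PySem.List.enumerate setlists = P
  have main : ∀ (P : List (Int × List Int)) (d : PySem.Dict Int (List (Int × Int))),
      d.keys.Nodup →
      (P.foldl (fun d p => p.2.foldl
        (fun d x => d.modify x [] (fun l => l ++ [(-(p.2.length : Int), p.1)])) d) d).keys.Nodup := by
    intro P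
    induction P with
    | nil => exact fun d h => h
    | cons p rest ih =>
      intro d h
      exact ih _ (PySem.Dict.nodup_keys_foldl_modify_key p.2 (fun x => x) []
        (fun _ _ => (· ++ [(-(p.2.length : Int), p.1)])) d h)
  exact main P _ PySem.Dict.nodup_keys_empty

-- inner counters of B's table have unique keys
theorem pvValsNodupB (setlists : List (List Int)) (a : Int) :
    ((pvTableB setlists).getD a PySem.Dict.empty).keys.Nodup := by
  unfold pvTableB
  generalize PySem.List.enumerate setlists = P
  have inner : ∀ (L : List Int) (v : Int × Int) (d : PySem.Dict Int (PySem.Dict (Int × Int) Int)),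
      (∀ a, (d.getD a PySem.Dict.empty).keys.Nodup) →
      ∀ a, ((L.foldl (fun d x => d.modify x PySem.Dict.empty
        (fun c => c.modify v 0 (· + 1))) d).getD a PySem.Dict.empty).keys.Nodup := by
    intro L v
    induction L with
    | nil => intro d h a; exact h a
    | cons x xs ih =>
      intro d h a
      refine ih _ ?_ a
      intro a'
      rw [PySem.Dict.getD_modify]
      by_cases hx : a' = x
      · simp only [if_pos hx, PySem.Dict.modify]
        exact PySem.Dict.nodup_keys_insert _ _ _ (h x)
      · simpa [hx] using h a'
  have main : ∀ (P : List (Int × List Int)) (d : PySem.Dict Int (PySem.Dict (Int × Int) Int)),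
      (∀ a, (d.getD a PySem.Dict.empty).keys.Nodup) →
      ∀ a, ((P.foldl (fun d p => p.2.foldl
        (fun d x => d.modify x PySem.Dict.empty
          (fun c => c.modify (-(p.2.length : Int), p.1) 0 (· + 1))) d) d).getD a
        PySem.Dict.empty).keys.Nodup := by
    intro P
    induction P with
    | nil => intro d h; exact h
    | cons p rest ih =>
      intro d h
      exact ih _ (inner p.2 _ d h)
  refine main P _ ?_ a
  intro a'
  simp

-- reading back a dict after re-inserting a transformed value for every item
theorem pvReinsertGet (f : List (Int × Int) → List (Int × Int)) :
    ∀ (l : List (Int × List (Int × Int))) (acc : PySem.Dict Int (List (Int × Int))) (k : Int),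
    (l.map Prod.fst).Nodup →
    (l.foldl (fun acc q => acc.insert q.1 (f q.2)) acc).get? k =
      (match l.find? (fun q => q.1 == k) with
       | some q => some (f q.2)
       | none => acc.get? k) := by
  intro l
  induction l with
  | nil => intro acc k _; simp
  | cons q rest ih =>
    intro acc k hnd
    simp only [List.map_cons, List.nodup_cons] at hnd
    simp only [List.foldl_cons, List.find?_cons]
    by_cases h : q.1 = k
    · subst h
      simp only [BEq.rfl]
      rw [ih _ _ hnd.2]
      have hfind : rest.find? (fun r => r.1 == q.1) = none := by
        rw [List.find?_eq_none]
        intro r hr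
        simp only [beq_iff_eq]
        intro heq
        exact hnd.1 (heq ▸ List.mem_map_of_mem hr)
      rw [hfind]
      rw [PySem.Dict.get?_insert]
      simp
    · have : (q.1 == k) = false := by simp [h]
      rw [this]
      rw [ih _ _ hnd.2]
      cases hfind : rest.find? (fun r => r.1 == k) with
      | some r => simp
      | none =>
        simp only [PySem.Dict.get?_insert]
        simp [Ne.symm h]

-- A's table after the value-sorting pass: every stored list sorted, keys untouched
theorem pvSortedGetD (setlists : List (List Int)) (a : Int) :
    (pvTableASorted setlists).getD a [] =
      PySem.List.sorted2 ((pvTableA setlists).getD a []) (·.1) (·.2) := by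
  unfold pvTableASorted
  have hnd : ((pvTableA setlists).items.map Prod.fst).Nodup := pvNodupKeysA setlists
  rw [PySem.Dict.getD_eq_get?_getD,
    pvReinsertGet (fun v => PySem.List.sorted2 v (·.1) (·.2)) _ _ a hnd]
  cases hfind : (pvTableA setlists).items.find? (fun q => q.1 == a) with
  | some q =>
    have hmem := List.mem_of_find?_eq_some hfind
    have hpred := List.find?_some hfind
    simp only [beq_iff_eq] at hpred
    subst hpred
    have := PySem.Dict.get?_of_mem_items (d := pvTableA setlists)
      (k := q.1) (v := q.2) (by simpa using hmem) (pvNodupKeysA setlists)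
    simp [PySem.Dict.getD_eq_get?_getD, this]
  | none =>
    have hnk : a ∉ (pvTableA setlists).keys := by
      intro hk
      simp only [PySem.Dict.keys] at hk
      rcases List.mem_map.mp hk with ⟨q, hq, hq1⟩
      have := List.find?_eq_none.mp hfind q hq
      simp [hq1] at this
    rw [(PySem.Dict.get?_eq_none_iff_not_mem_keys _ _).mpr hnk]
    have : (pvTableA setlists).get? a = none :=
      (PySem.Dict.get?_eq_none_iff_not_mem_keys _ _).mpr hnk
    simp [PySem.Dict.getD_eq_get?_getD, this]
    rfl


-- ---- the pool of (entry, bucket index, position) heap items ----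

-- items of one bucket from position p on
def pvTriples (b : Int) (bucket : List (Int × Int)) (p : Nat) :
    List ((Int × Int) × Int × Int) :=
  ((PySem.List.enumerate bucket).drop p).map (fun q => (q.2, b, q.1))

-- all items not yet popped, bucket by bucket (pp = positions)
def pvRemain : Int → List (List (Int × Int)) → List Nat → List ((Int × Int) × Int × Int)
  | _, [], _ => []
  | _, _ :: _, [] => []
  | b, bucket :: bs, p :: pp => pvTriples b bucket p ++ pvRemain (b + 1) bs pp

-- the least unpopped item of each bucket (= the heap's contents, as a multiset)
def pvFrontier : Int → List (List (Int × Int)) → List Nat → List ((Int × Int) × Int × Int)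
  | _, [], _ => []
  | _, _ :: _, [] => []
  | b, bucket :: bs, p :: pp => (pvTriples b bucket p).take 1 ++ pvFrontier (b + 1) bs pp

theorem pvTriples_nil {bucket : List (Int × Int)} {p : Nat} (b : Int)
    (h : bucket.length ≤ p) : pvTriples b bucket p = [] := by
  unfold pvTriples
  rw [List.drop_eq_nil_of_le (by simpa using h)]
  rfl

theorem pvTriples_cons {bucket : List (Int × Int)} {p : Nat} (b : Int)
    (h : p < bucket.length) :
    pvTriples b bucket p =
      (bucket.getD p (0, 0), b, (p : Int)) :: pvTriples b bucket (p + 1) := by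
  unfold pvTriples
  have hlen : p < (PySem.List.enumerate bucket 0).length := by
    simpa [PySem.List.length_enumerate] using h
  rw [List.drop_eq_getElem_cons hlen]
  simp [PySem.List.getElem_enumerate, List.getD_eq_getElem?_getD, List.getElem?_eq_getElem h]

theorem pvTriples_map_fst_zero (b : Int) (bucket : List (Int × Int)) :
    (pvTriples b bucket 0).map (·.1) = bucket := by
  unfold pvTriples
  simp only [List.drop_zero, List.map_map]
  exact PySem.List.map_snd_enumerate bucket 0

theorem pvTriples_fst (b : Int) (bucket : List (Int × Int)) (p : Nat) :
    ∀ t ∈ pvTriples b bucket p, t.2.1 = b := by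
  intro t ht
  rcases List.mem_map.mp ht with ⟨q, _, rfl⟩
  rfl

theorem pvEnumerate_pairwise {bucket : List (Int × Int)} (hs : bucket.Pairwise pvELe) :
    ∀ s, (PySem.List.enumerate bucket s).Pairwise (fun q q' => q.1 < q'.1 ∧ pvELe q.2 q'.2) := by
  induction bucket with
  | nil => intro s; simp [PySem.List.enumerate]
  | cons x xs ih =>
    intro s
    rcases List.pairwise_cons.mp hs with ⟨hx, hxs⟩
    rw [PySem.List.enumerate_cons]
    refine List.pairwise_cons.mpr ⟨?_, ih hxs (s + 1)⟩
    intro q hq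
    rcases (PySem.List.mem_enumerate_iff _ _ _).mp hq with ⟨k, hk, rfl⟩
    constructor
    · simp; omega
    · exact hx _ (List.getElem_mem hk)

theorem pvTriples_pairwise {bucket : List (Int × Int)} (hs : bucket.Pairwise pvELe)
    (b : Int) (p : Nat) : (pvTriples b bucket p).Pairwise pvTLt := by
  unfold pvTriples
  refine List.Pairwise.map _ ?_ (((pvEnumerate_pairwise hs 0).sublist (List.drop_sublist _ _)))
  intro q q' hqq
  rcases hqq with ⟨hlt, hle⟩
  rcases hle with h1 | ⟨h1, h2⟩
  · exact Or.inl (Or.inl h1)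
  · rcases lt_or_eq_of_le h2 with h2' | h2'
    · exact Or.inl (Or.inr ⟨h1, h2'⟩)
    · right
      refine ⟨Prod.ext h1 h2', Or.inr ⟨rfl, by exact_mod_cast hlt⟩⟩

theorem pvTriples_nodup (b : Int) (bucket : List (Int × Int)) (p : Nat) :
    (pvTriples b bucket p).Nodup := by
  unfold pvTriples
  refine List.Nodup.map_on ?_ ?_
  · intro q _ q' _ h
    have h1 : q.1 = q'.1 := congrArg (fun t => t.2.2) h
    have h2 : q.2 = q'.2 := congrArg (fun t => t.1) h
    exact Prod.ext h1 h2
  · refine List.Nodup.sublist (List.drop_sublist _ _) ?_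
    refine List.Pairwise.imp ?_ (PySem.List.pairwise_lt_enumerate bucket 0)
    intro a b h hab
    rw [hab] at h
    omega

theorem pvRemain_fst_lower (b : Int) (bs : List (List (Int × Int))) (pp : List Nat) :
    ∀ r ∈ pvRemain b bs pp, b ≤ r.2.1 := by
  induction bs generalizing b pp with
  | nil => intro r hr; simp [pvRemain] at hr
  | cons bucket bs' ih =>
    intro r hr
    cases pp with
    | nil => simp [pvRemain] at hr
    | cons p pp' =>
      rcases List.mem_append.mp hr with h | h
      · rw [pvTriples_fst _ _ _ r h]
      · have := ih (b + 1) pp' r h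
        omega

theorem pvRemain_nodup (b : Int) (bs : List (List (Int × Int))) (pp : List Nat) :
    (pvRemain b bs pp).Nodup := by
  induction bs generalizing b pp with
  | nil => simp [pvRemain]
  | cons bucket bs' ih =>
    cases pp with
    | nil => simp [pvRemain]
    | cons p pp' =>
      refine List.Nodup.append (pvTriples_nodup _ _ _) (ih (b + 1) pp') ?_
      intro t ht ht'
      have h1 := pvTriples_fst _ _ _ t ht
      have h2 := pvRemain_fst_lower _ _ _ t ht'
      omega

theorem pvRemain_zero_map_fst (bs : List (List (Int × Int))) :
    ∀ b, (pvRemain b bs (List.replicate bs.length 0)).map (·.1) = bs.flatten := by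
  induction bs with
  | nil => intro b; simp [pvRemain]
  | cons bucket bs' ih =>
    intro b
    simp only [List.length_cons, List.replicate_succ, pvRemain, List.map_append,
      pvTriples_map_fst_zero, List.flatten_cons, ih]

theorem pvFrontier_zero (bs : List (List (Int × Int))) (hne : ∀ bucket ∈ bs, bucket ≠ []) :
    ∀ b, pvFrontier b bs (List.replicate bs.length 0) =
      (PySem.List.enumerate bs b).map
        (fun q => (PySem.List.pyGetD q.2 0 (0, 0), q.1, (0 : Int))) := by
  induction bs with
  | nil => intro b; simp [pvFrontier, PySem.List.enumerate]
  | cons bucket bs' ih =>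
    intro b
    have hb : bucket ≠ [] := hne bucket (by simp)
    have hlen : 0 < bucket.length := List.length_pos_of_ne_nil hb
    simp only [List.length_cons, List.replicate_succ, pvFrontier, PySem.List.enumerate_cons,
      List.map_cons]
    rw [pvTriples_cons b hlen, ih (fun bk h => hne bk (by simp [h]))]
    simp [PySem.List.pyGetD_zero]

theorem pvFrontier_dominates {bs : List (List (Int × Int))}
    (hs : ∀ bucket ∈ bs, bucket.Pairwise pvELe) :
    ∀ (b : Int) (pp : List Nat), ∀ r ∈ pvRemain b bs pp,
      ∃ u ∈ pvFrontier b bs pp, u = r ∨ pvTLt u r := by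
  induction bs with
  | nil => intro b pp r hr; simp [pvRemain] at hr
  | cons bucket bs' ih =>
    intro b pp r hr
    cases pp with
    | nil => simp [pvRemain] at hr
    | cons p pp' =>
      rcases List.mem_append.mp hr with h | h
      · by_cases hp : p < bucket.length
        · rw [pvTriples_cons b hp] at h
          refine ⟨(bucket.getD p (0, 0), b, (p : Int)), ?_, ?_⟩
          · simp [pvFrontier, pvTriples_cons b hp]
          · rcases List.mem_cons.mp h with rfl | h'
            · exact Or.inl rfl
            · right
              have hp2 := pvTriples_pairwise (hs bucket (by simp)) b p
              rw [pvTriples_cons b hp] at hp2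
              exact (List.pairwise_cons.mp hp2).1 r h'
        · rw [pvTriples_nil b (by omega)] at h
          simp at h
      · rcases ih (fun bk hbk => hs bk (by simp [hbk])) (b + 1) pp' r h with ⟨u, hu, hur⟩
        exact ⟨u, List.mem_append.mpr (Or.inr hu), hur⟩


-- popping a frontier item: how frontier and remain decompose and update
theorem pvStep :
    ∀ (bs : List (List (Int × Int))) (pp : List Nat) (b : Int)
      (t : (Int × Int) × Int × Int),
    pp.length = bs.length → t ∈ pvFrontier b bs pp →
    ∃ (k : Nat) (hk : k < bs.length) (p : Nat),
      pp[k]? = some p ∧ p < bs[k].length ∧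
      t = ((bs[k]).getD p (0, 0), b + k, (p : Int)) ∧
      (∃ X Y, pvFrontier b bs pp = X ++ t :: Y ∧
        pvFrontier b bs (pp.set k (p + 1)) =
          X ++ (pvTriples (b + k) bs[k] (p + 1)).take 1 ++ Y) ∧
      (∃ U V, pvRemain b bs pp = U ++ t :: V ∧
        pvRemain b bs (pp.set k (p + 1)) = U ++ V) := by
  intro bs
  induction bs with
  | nil => intro pp b t _ ht; simp [pvFrontier] at ht
  | cons bucket bs' ih =>
    intro pp b t hl ht
    cases pp with
    | nil => simp at hl
    | cons p pp' =>
      simp only [List.length_cons, Nat.succ_inj] at hl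
      rcases List.mem_append.mp ht with h | h
      · -- t is the head of the first bucket's remainder
        by_cases hp : p < bucket.length
        · rw [pvTriples_cons b hp] at h
          simp only [List.take_succ_cons, List.take_zero, List.mem_singleton] at h
          subst h
          refine ⟨0, by simp, p, by simp, by simpa using hp, by simp, ?_, ?_⟩
          · refine ⟨[], pvFrontier (b + 1) bs' pp', ?_, ?_⟩
            · simp [pvFrontier, pvTriples_cons b hp]
            · simp [pvFrontier]
          · refine ⟨[], pvTriples b bucket (p + 1) ++ pvRemain (b + 1) bs' pp', ?_, ?_⟩
            · simp [pvRemain, pvTriples_cons b hp]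
            · simp [pvRemain]
        · rw [pvTriples_nil b (by omega)] at h
          simp at h
      · -- t comes from a later bucket
        rcases ih pp' (b + 1) t hl h with
          ⟨k, hk, q, hq, hqlen, hteq, ⟨X, Y, hF, hF'⟩, ⟨U, V, hR, hR'⟩⟩
        refine ⟨k + 1, by simpa using hk, q, by simpa using hq, by simpa using hqlen, ?_, ?_, ?_⟩
        · rw [hteq]
          congr 2
          push_cast
          ring
        · refine ⟨(pvTriples b bucket p).take 1 ++ X, Y, ?_, ?_⟩
          · simp [pvFrontier, hF]
          · have harith : b + 1 + (k : Int) = b + ((k : Nat) + 1 : Nat) := by push_cast; ring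
            simp only [pvFrontier, List.set_cons_succ, hF']
            rw [← harith]
            simp [List.append_assoc]
        · refine ⟨pvTriples b bucket p ++ U, V, ?_, ?_⟩
          · simp [pvRemain, hR]
          · simp [pvRemain, List.set_cons_succ, hR']


-- ---- small order / list facts used by the loop invariant ----

theorem pvELe_refl (a : Int × Int) : pvELe a a := by
  simp [pvELe]

theorem pvELt_irrefl (a : Int × Int) : ¬ pvELt a a := by
  rcases a with ⟨x, y⟩; simp [pvELt]

theorem pvTLt_total (a b : (Int × Int) × Int × Int) : pvTLt a b ∨ pvTLt b a ∨ a = b := by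
  rcases a with ⟨⟨x1, x2⟩, x3, x4⟩; rcases b with ⟨⟨y1, y2⟩, y3, y4⟩
  simp only [pvTLt, pvELt, Prod.ext_iff]
  omega

theorem pvPairwiseELe_getElem {es : List (Int × Int)} (h : es.Pairwise pvELe)
    {i j : Nat} (hij : i ≤ j) (hj : j < es.length) : pvELe es[i] es[j] := by
  rcases Nat.lt_or_ge i j with hlt | hge
  · exact List.pairwise_iff_getElem.mp h i j (by omega) hj hlt
  · have : i = j := by omega
    subst this
    exact pvELe_refl _

-- in a ≤-sorted list with equal first and last entries, everything is that entry
theorem pvConstOfEnds {es : List (Int × Int)} (h : es.Pairwise pvELe) {n : Nat}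
    (hl : es.length = n) (hn : 0 < n) (hends : es[0]'(by omega) = es[n - 1]'(by omega)) :
    es = List.replicate n (es[0]'(by omega)) := by
  apply List.ext_getElem (by simpa using hl)
  intro i hi _
  simp only [List.getElem_replicate]
  have h1 : pvELe (es[0]'(by omega)) es[i] := pvPairwiseELe_getElem h (by omega) hi
  have h2 : pvELe es[i] (es[n - 1]'(by omega)) := pvPairwiseELe_getElem h (by omega) (by omega)
  rw [← hends] at h2
  exact (pvELe_antisymm h2 h1)

-- in a ≤-sorted list the copies of the last element form exactly the final run
theorem pvLastRun {es : List (Int × Int)} (h : es.Pairwise pvELe) (hne : es ≠ []) :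
    es.drop (es.length - es.count (es.getLast hne)) =
      List.replicate (es.count (es.getLast hne)) (es.getLast hne) := by
  set v := es.getLast hne with hv
  set c := es.count v with hc
  have hcle : c ≤ es.length := hc ▸ List.count_le_length
  have hcpos : 1 ≤ c := by
    have : v ∈ es := List.getLast_mem hne
    simpa [hc] using List.count_pos_iff.mpr this
  have hval : ∀ j (hj : j < es.length), es.length - c ≤ j → es[j] = v := by
    intro j hj hjge
    by_contra hne'
    have hup : ∀ i (hi : i < es.length), i ≤ j → es[i] ≠ v := by
      intro i hi hij hiv
      have h1 : pvELe es[i] es[j] := pvPairwiseELe_getElem h hij hj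
      have h2 : pvELe es[j] (es[es.length - 1]'(by omega)) :=
        pvPairwiseELe_getElem h (by omega) (by omega)
      have hlast : es[es.length - 1]'(by omega) = v := by
        rw [hv, List.getLast_eq_getElem]
      rw [hlast] at h2
      rw [hiv] at h1
      exact hne' (pvELe_antisymm h2 h1)
    have hsplit : es.count v = (es.take (j + 1)).count v + (es.drop (j + 1)).count v := by
      rw [← List.count_append, List.take_append_drop]
    have htake : (es.take (j + 1)).count v = 0 := by
      rw [List.count_eq_zero]
      intro hmem
      rcases List.mem_iff_getElem.mp hmem with ⟨i, hi, hieq⟩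
      have hi' : i < es.length := by
        have := hi
        simp only [List.length_take] at this
        omega
      have : (es.take (j + 1))[i] = es[i] := List.getElem_take
      rw [this] at hieq
      have hij : i ≤ j := by
        have := hi
        simp only [List.length_take] at this
        omega
      exact hup i hi' hij hieq
    have hdrop : (es.drop (j + 1)).count v ≤ es.length - (j + 1) := by
      have := List.count_le_length (l := es.drop (j + 1)) (a := v)
      simpa using this
    omega
  apply List.ext_getElem (by simp; omega)
  intro i hi1 hi2
  have hlen : (es.drop (es.length - c)).length = c := by simp; omega
  rw [List.getElem_drop]
  simp only [List.getElem_replicate]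
  exact hval _ (by omega) (by omega)

-- appending to the bounded deque = appending to the history and keeping the last n
theorem pvDequeAppend_drop (n : Nat) (hn : 1 ≤ n) (es : List (Int × Int)) (v : Int × Int) :
    pvDequeAppend n (es.drop (es.length - n)) v = (es ++ [v]).drop (es.length + 1 - n) := by
  unfold pvDequeAppend
  rcases Nat.lt_or_ge es.length n with hlt | hge
  · have h1 : es.length - n = 0 := by omega
    have h2 : es.length + 1 - n = 0 := by omega
    simp only [h1, h2, List.drop_zero]
    rw [if_neg (by simp; omega)]
  · have hlen : (es.drop (es.length - n)).length = n := by simp; omega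
    rw [if_pos (by simp [hlen])]
    have h3 : es.length - n < es.length := by omega
    rw [List.drop_append_of_le_length (by omega)]
    have : es.length + 1 - n = (es.length - n) + 1 := by omega
    rw [this]
    rcases List.exists_cons_of_ne_nil (l := es.drop (es.length - n))
        (by intro hnil; rw [hnil] at hlen; simp at hlen; omega) with ⟨a, t, hat⟩
    rw [hat]
    have : es.drop (es.length - n + 1) = t := by
      have h5 : (es.drop (es.length - n)).tail = es.drop (es.length - n + 1) :=
        List.tail_drop
      rw [hat] at h5
      simpa using h5.symm
    rw [this]
    simp


-- ---- the merge loop returns the least entry whose pool count reaches n ----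

theorem pvLoopMain (bs : List (List (Int × Int))) (n : Nat)
    (hs : ∀ bucket ∈ bs, bucket.Pairwise pvELe) (hn : 1 ≤ n)
    (e₀ : Int × Int) (he₀ : n ≤ bs.flatten.count e₀) :
    ∀ (fuel : Nat) (pp : List Nat) (σ : List ((Int × Int) × Int × Int))
      (heap : List ((Int × Int) × Int × Int)),
    pp.length = bs.length →
    (pvRemain 0 bs pp).length < fuel →
    heap.Pairwise (fun a b => pvTLtb b a = false) →
    heap.Perm (pvFrontier 0 bs pp) →
    σ.Pairwise pvTLt →
    (∀ s ∈ σ, ∀ r ∈ pvRemain 0 bs pp, pvTLt s r) →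
    (∀ e, (σ.map (·.1)).count e + ((pvRemain 0 bs pp).map (·.1)).count e =
      bs.flatten.count e) →
    (∀ e, n ≤ (σ.map (·.1)).count e →
      (σ.map (·.1)).drop (σ.length - n) = List.replicate n e) →
    n ≤ bs.flatten.count
        (PySem.List.pyGetD
          (pvMergeLoop bs n fuel heap ((σ.map (·.1)).drop (σ.length - n))) 0 (0, 0)) ∧
      ∀ e, n ≤ bs.flatten.count e →
        pvELe (PySem.List.pyGetD
          (pvMergeLoop bs n fuel heap ((σ.map (·.1)).drop (σ.length - n))) 0 (0, 0)) e := by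
  intro fuel
  induction fuel with
  | zero =>
    intro pp σ heap _ hfuel
    omega
  | succ fuel ih =>
    intro pp σ heap hl hfuel hhs hhp hσs hbef hcnt hrun
    have hesp : (σ.map (·.1)).Pairwise pvELe :=
      List.pairwise_map.mpr (hσs.imp (fun h => pvELe_fst_of_pvTLt h))
    have heslen : (σ.map (·.1)).length = σ.length := by simp
    have hrepget : ∀ (e : Int × Int), PySem.List.pyGetD (List.replicate n e) 0 (0, 0) = e := by
      intro e
      rw [PySem.List.pyGetD_zero, List.getD_eq_getElem?_getD, List.getElem?_replicate]
      simp only [if_pos (by omega : 0 < n), Option.getD_some]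
    -- once some entry reaches n copies in the history, the deque is its n-replicate and
    -- the loop's condition is false
    have hstopped : ∀ e, n ≤ (σ.map (·.1)).count e →
        ¬ (((σ.map (·.1)).drop (σ.length - n)).length < n ∨
           PySem.List.pyGet? ((σ.map (·.1)).drop (σ.length - n)) 0 ≠
             PySem.List.pyGet? ((σ.map (·.1)).drop (σ.length - n)) ((n : Int) - 1)) := by
      intro e he
      rw [hrun e he]
      push_neg
      constructor
      · simp
      · have h0 : PySem.List.pyGet? (List.replicate n e) ((0 : Nat) : Int) =
            (List.replicate n e)[(0 : Nat)]? := PySem.List.pyGet?_natCast _ 0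
        have h1 : ((n : Int) - 1) = ((n - 1 : Nat) : Int) := by omega
        rw [h1, PySem.List.pyGet?_natCast]
        simp only [Nat.cast_zero] at h0
        rw [h0, List.getElem?_replicate, List.getElem?_replicate]
        simp only [if_pos (by omega : 0 < n), if_pos (by omega : n - 1 < n)]
    cases heap with
    | nil =>
      -- empty heap ⇒ empty frontier ⇒ nothing remains: the history holds the whole pool
      have hfr : pvFrontier 0 bs pp = [] := List.perm_nil.mp hhp.symm
      have hrem : pvRemain 0 bs pp = [] := by
        rcases h : pvRemain 0 bs pp with _ | ⟨r, rs⟩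
        · rfl
        · exfalso
          have hrmem : r ∈ pvRemain 0 bs pp := by rw [h]; simp
          rcases pvFrontier_dominates hs 0 pp r hrmem with ⟨u, hu, _⟩
          rw [hfr] at hu
          simp at hu
      have hcnt0 : (σ.map (·.1)).count e₀ = bs.flatten.count e₀ := by
        rw [← hcnt e₀, hrem]
        simp
      have hd := hrun e₀ (by omega)
      simp only [pvMergeLoop]
      rw [hd, hrepget]
      refine ⟨he₀, ?_⟩
      intro e he
      have hce : (σ.map (·.1)).count e = bs.flatten.count e := by
        rw [← hcnt e, hrem]
        simp
      have hde := hrun e (by omega)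
      rw [hd] at hde
      have hee : e₀ = e := by
        have h00 := congrArg (fun l => PySem.List.pyGetD l 0 ((0 : Int), (0 : Int))) hde
        simpa [hrepget] using h00
      rw [← hee]
      exact pvELe_refl _
    | cons t rest =>
      simp only [pvMergeLoop]
      by_cases hc : ((σ.map (·.1)).drop (σ.length - n)).length < n ∨
          PySem.List.pyGet? ((σ.map (·.1)).drop (σ.length - n)) 0 ≠
            PySem.List.pyGet? ((σ.map (·.1)).drop (σ.length - n)) ((n : Int) - 1)
      · -- CONTINUE: pop t, push its successor from the same bucket, recurse
        rw [if_pos hc]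
        have hnostop : ∀ e, ¬ n ≤ (σ.map (·.1)).count e := fun e he => hstopped e he hc
        have ht : t ∈ pvFrontier 0 bs pp := hhp.subset (List.mem_cons_self)
        rcases pvStep bs pp 0 t hl ht with
          ⟨k, hk, p, hpk, hplen, hteq, ⟨X, Y, hF, hF'⟩, ⟨U, V, hR, hR'⟩⟩
        simp only [zero_add] at hteq hF'
        have htmem : t ∈ pvRemain 0 bs pp := by
          rw [hR]
          exact List.mem_append.mpr (Or.inr List.mem_cons_self)
        have htnot : t ∉ U ++ V := by
          have hnd : (pvRemain 0 bs pp).Nodup := pvRemain_nodup 0 bs pp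
          rw [hR] at hnd
          have := hnd.perm List.perm_middle
          exact (List.nodup_cons.mp this).1
        -- t is a strict lower bound for everything still remaining
        have hmin : ∀ r ∈ U ++ V, pvTLt t r := by
          intro r hr
          have hrold : r ∈ pvRemain 0 bs pp := by
            rw [hR]
            rcases List.mem_append.mp hr with h | h
            · exact List.mem_append.mpr (Or.inl h)
            · exact List.mem_append.mpr (Or.inr (List.mem_cons_of_mem _ h))
          have hrne : r ≠ t := fun h => htnot (h ▸ hr)
          rcases pvTLt_total t r with h | h | h
          · exact h
          · exfalso
            rcases pvFrontier_dominates hs 0 pp r hrold with ⟨u, hu, hur⟩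
            have humem : u ∈ t :: rest := hhp.symm.subset hu
            have hult : pvTLt u t := by
              rcases hur with rfl | hur
              · exact h
              · exact pvTLt_trans hur h
            rcases List.mem_cons.mp humem with rfl | humem'
            · exact pvTLt_asymm hult hult
            · have hfalse := (List.pairwise_cons.mp hhs).1 u humem'
              rw [(pvTLtb_iff u t).mpr hult] at hfalse
              exact Bool.true_eq_false.mp hfalse
          · exact absurd h.symm hrne
        -- the port's step values
        have ht21 : t.2.1 = (k : Int) := by rw [hteq]
        have ht22 : t.2.2 = (p : Int) := by rw [hteq]
        have hbucket : PySem.List.pyGetD bs ((k : Nat) : Int) [] = bs[k] := by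
          rw [PySem.List.pyGetD_natCast, List.getD_eq_getElem?_getD,
            List.getElem?_eq_getElem hk]
          rfl
        -- the new history
        have hσs' : (σ ++ [t]).Pairwise pvTLt := by
          rw [List.pairwise_append]
          exact ⟨hσs, by simp, fun s hsσ u hu => by
            rcases List.mem_singleton.mp hu with rfl
            exact hbef s hsσ u htmem⟩
        have hes' : ((σ ++ [t]).map (·.1)) = σ.map (·.1) ++ [t.1] := by simp
        have hesp' : ((σ ++ [t]).map (·.1)).Pairwise pvELe :=
          List.pairwise_map.mpr (hσs'.imp (fun h => pvELe_fst_of_pvTLt h))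
        have hdqstep : pvDequeAppend n ((σ.map (·.1)).drop (σ.length - n)) t.1 =
            (((σ ++ [t]).map (·.1)).drop ((σ ++ [t]).length - n)) := by
          rw [← heslen, pvDequeAppend_drop n hn]
          simp
        -- invariants for the recursive call
        have hl' : (pp.set k (p + 1)).length = bs.length := by simp [hl]
        have hfuel' : (pvRemain 0 bs (pp.set k (p + 1))).length < fuel := by
          have h1 := congrArg List.length hR
          have h2 := congrArg List.length hR'
          simp only [List.length_append, List.length_cons] at h1 h2
          omega
        have hbef' : ∀ s ∈ σ ++ [t], ∀ r ∈ pvRemain 0 bs (pp.set k (p + 1)), pvTLt s r := by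
          intro s hsm r hr
          rw [hR'] at hr
          rcases List.mem_append.mp hsm with hsσ | hst
          · refine hbef s hsσ r ?_
            rw [hR]
            rcases List.mem_append.mp hr with h | h
            · exact List.mem_append.mpr (Or.inl h)
            · exact List.mem_append.mpr (Or.inr (List.mem_cons_of_mem _ h))
          · rcases List.mem_singleton.mp hst with rfl
            exact hmin r hr
        have hcnt' : ∀ e, (((σ ++ [t]).map (·.1)).count e +
            ((pvRemain 0 bs (pp.set k (p + 1))).map (·.1)).count e =
              bs.flatten.count e) := by
          intro e
          have h0 := hcnt e
          rw [hR] at h0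
          rw [hR', hes']
          simp only [List.map_append, List.count_append, List.map_cons,
            List.count_cons, List.count_nil] at h0 ⊢
          split_ifs at h0 ⊢ <;> omega
        have hrun' : ∀ e, n ≤ ((σ ++ [t]).map (·.1)).count e →
            ((σ ++ [t]).map (·.1)).drop ((σ ++ [t]).length - n) =
              List.replicate n e := by
          intro e he
          have hlt := hnostop e
          have hcnte : ((σ ++ [t]).map (·.1)).count e =
              (σ.map (·.1)).count e + if t.1 = e then 1 else 0 := by
            rw [hes', List.count_append]
            by_cases h : t.1 = e <;> simp [h]
          have hte : t.1 = e := by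
            by_contra h
            rw [hcnte, if_neg h] at he
            omega
          have hcn : ((σ ++ [t]).map (·.1)).count e = n := by
            rw [hcnte, if_pos hte] at he ⊢
            omega
          have hne' : ((σ ++ [t]).map (·.1)) ≠ [] := by simp
          have hlast : ((σ ++ [t]).map (·.1)).getLast hne' = e := by
            rw [List.getLast_eq_getElem]
            simp [hte]
          have hrunlast := pvLastRun hesp' hne'
          rw [hlast, hcn] at hrunlast
          have hlen' : ((σ ++ [t]).map (·.1)).length = (σ ++ [t]).length := by simp
          rw [hlen'] at hrunlast
          exact hrunlast
        -- now rewrite the port's step into invariant form and recurse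
        simp only [ht21, ht22, hdqstep, hbucket]
        by_cases hnext : p + 1 < (bs[k]).length
        · rw [if_pos (show ((p : Int) + 1 < ((bs[k]).length : Int)) from by
            exact_mod_cast hnext)]
          rw [show ((p : Int) + 1) = (((p + 1 : Nat)) : Int) from by push_cast; ring,
            PySem.List.pyGetD_natCast]
          refine ih (pp.set k (p + 1)) (σ ++ [t]) _ hl' hfuel' ?_ ?_ hσs' hbef' hcnt' hrun'
          · rw [pvHeapPush_eq]
            exact pvInsertBy_pairwise pvTLtb pvTLtb_asymm pvTLtb_trans _ rest
              (List.pairwise_cons.mp hhs).2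
          · have hrestperm : rest.Perm (X ++ Y) := by
              have h1 : (t :: rest).Perm (t :: (X ++ Y)) :=
                hhp.trans (by rw [hF]; exact List.perm_middle)
              exact h1.cons_inv
            rw [pvHeapPush_eq, hF', pvTriples_cons (k : Int) hnext]
            simp only [List.take_succ_cons, List.take_zero, List.append_assoc,
              List.singleton_append]
            refine (pvInsertBy_perm _ _ _).trans ?_
            exact (hrestperm.cons _).trans List.perm_middle.symm
        · rw [if_neg (show ¬ ((p : Int) + 1 < ((bs[k]).length : Int)) from by
            push_cast
            omega)]
          refine ih (pp.set k (p + 1)) (σ ++ [t]) rest hl' hfuel'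
            (List.pairwise_cons.mp hhs).2 ?_ hσs' hbef' hcnt' hrun'
          have hrestperm : rest.Perm (X ++ Y) := by
            have h1 : (t :: rest).Perm (t :: (X ++ Y)) :=
              hhp.trans (by rw [hF]; exact List.perm_middle)
            exact h1.cons_inv
          rw [hF', pvTriples_nil (k : Int) (by omega)]
          simpa using hrestperm
      · -- STOP: the deque's ends coincide, so it is a constant block of the answer
        rw [if_neg hc]
        push_neg at hc
        obtain ⟨hc1, hc2⟩ := hc
        have hσn : n ≤ σ.length := by
          simp only [List.length_drop, heslen] at hc1
          omega
        have hdqlen : ((σ.map (·.1)).drop (σ.length - n)).length = n := by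
          simp only [List.length_drop, heslen]
          omega
        have hdqp : ((σ.map (·.1)).drop (σ.length - n)).Pairwise pvELe :=
          hesp.sublist (List.drop_sublist _ _)
        have h0lt : 0 < ((σ.map (·.1)).drop (σ.length - n)).length := by omega
        have hg0 : PySem.List.pyGet? ((σ.map (·.1)).drop (σ.length - n)) 0 =
            some (((σ.map (·.1)).drop (σ.length - n))[0]'h0lt) := by
          have h00 := PySem.List.pyGet?_natCast ((σ.map (·.1)).drop (σ.length - n)) 0
          simp only [Nat.cast_zero] at h00
          rw [h00, List.getElem?_eq_getElem h0lt]
        have hg1 : PySem.List.pyGet? ((σ.map (·.1)).drop (σ.length - n)) ((n : Int) - 1) =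
            some (((σ.map (·.1)).drop (σ.length - n))[n - 1]'(by omega)) := by
          rw [show ((n : Int) - 1) = ((n - 1 : Nat) : Int) by omega,
            PySem.List.pyGet?_natCast, List.getElem?_eq_getElem (by omega)]
        rw [hg0, hg1] at hc2
        have hends := Option.some.inj hc2
        have hrep := pvConstOfEnds hdqp hdqlen (by omega) hends
        set m := ((σ.map (·.1)).drop (σ.length - n))[0]'h0lt with hmdef
        have hmget : PySem.List.pyGetD ((σ.map (·.1)).drop (σ.length - n)) 0 (0, 0) = m := by
          rw [PySem.List.pyGetD_zero, List.getD_eq_getElem?_getD,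
            List.getElem?_eq_getElem h0lt]
          rfl
        rw [hmget]
        have hcntm : n ≤ (σ.map (·.1)).count m := by
          have hsub := (List.drop_sublist (σ.length - n) (σ.map (·.1))).count_le m
          rw [hrep] at hsub
          simpa using hsub
        refine ⟨by have := hcnt m; omega, ?_⟩
        intro e he
        by_contra hnle
        have helt : pvELt e m := by
          rcases pvELt_total e m with h | h | h
          · exact h
          · exact absurd (pvELe_of_lt h) hnle
          · exact absurd (by rw [h]; exact pvELe_refl m) hnle
        have hσne : 0 < σ.length := by omega
        -- the last history entry is m
        have hlastm : m = (σ.map (·.1))[σ.length - 1]'(by simp; omega) := by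
          rw [hends, List.getElem_drop]
          simp only [show σ.length - n + (n - 1) = σ.length - 1 from by omega]
        -- nothing with entry e remains
        have hremz : ((pvRemain 0 bs pp).map (·.1)).count e = 0 := by
          rw [List.count_eq_zero]
          intro hmem
          rcases List.mem_map.mp hmem with ⟨r, hr, hre⟩
          have hσmem : σ[σ.length - 1]'(by omega) ∈ σ := List.getElem_mem _
          have hlt := hbef (σ[σ.length - 1]'(by omega)) hσmem r hr
          have hle := pvELe_fst_of_pvTLt hlt
          have h1 : (σ[σ.length - 1]'(by omega)).1 = m := by
            rw [hlastm]
            simp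
          rw [h1, hre] at hle
          exact pvELt_irrefl m (pvELt_of_le_of_lt hle helt)
        have hecnt : n ≤ (σ.map (·.1)).count e := by
          have := hcnt e
          omega
        have hde := hrun e hecnt
        rw [hrep] at hde
        have hme : m = e := by
          have h00 := congrArg (fun l => PySem.List.pyGetD l 0 ((0 : Int), (0 : Int))) hde
          simpa [hrepget] using h00
        exact pvELt_irrefl e (hme ▸ helt)


-- ---- B-side: summed counters and Python's min over entry tuples ----

theorem pvAddGetD (l : List ((Int × Int) × Int)) :
    ∀ (t : PySem.Dict (Int × Int) Int) (e : Int × Int),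
    (l.foldl (fun t q => t.modify q.1 0 (· + q.2)) t).getD e 0 =
      t.getD e 0 + ((l.filter (fun q => q.1 == e)).map (·.2)).sum := by
  induction l with
  | nil => intro t e; simp
  | cons q rest ih =>
    intro t e
    simp only [List.foldl_cons, List.filter_cons]
    rw [ih, PySem.Dict.getD_modify]
    by_cases h : q.1 = e
    · simp only [h, beq_self_eq_true, if_pos]
      simp
      ring
    · have hb : (q.1 == e) = false := by simp [h]
      simp only [hb, Bool.false_eq_true, if_false, if_neg (Ne.symm h)]

theorem pvListSum (l : List ((Int × Int) × Int)) :
    ∀ (e : Int × Int), (l.map Prod.fst).Nodup →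
    ((l.filter (fun q => q.1 == e)).map (·.2)).sum =
      ((PySem.Dict.mk l).get? e).getD 0 := by
  induction l with
  | nil => intro e _; simp [PySem.Dict.get?]
  | cons q rest ih =>
    rcases q with ⟨qk, qv⟩
    intro e hnd
    simp only [List.map_cons, List.nodup_cons] at hnd
    simp only [List.filter_cons, PySem.Dict.get?_mk_cons]
    by_cases h : qk = e
    · have hb : ((qk, qv).1 == e) = true := by simp [h]
      rw [hb]
      have hfil : rest.filter (fun r => r.1 == e) = [] := by
        rw [List.filter_eq_nil_iff]
        intro r hr
        simp only [beq_iff_eq]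
        intro hre
        exact hnd.1 (by rw [h, ← hre]; exact List.mem_map_of_mem hr)
      simp [hfil]
    · have hb : ((qk, qv).1 == e) = false := by simp [h]
      rw [hb]
      simp only [Bool.false_eq_true, if_false]
      exact ih e hnd.2

theorem pvDictSum (u : PySem.Dict (Int × Int) Int) (hnd : u.keys.Nodup) (e : Int × Int) :
    ((u.items.filter (fun q => q.1 == e)).map (·.2)).sum = u.getD e 0 := by
  rw [PySem.Dict.getD_eq_get?_getD]
  exact pvListSum u.items e hnd

theorem pvCounterAdd_getD (t u : PySem.Dict (Int × Int) Int) (hnd : u.keys.Nodup)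
    (e : Int × Int) : (pvCounterAdd t u).getD e 0 = t.getD e 0 + u.getD e 0 := by
  unfold pvCounterAdd
  rw [pvAddGetD, pvDictSum u hnd]

theorem pvCounterAdd_nodup (t u : PySem.Dict (Int × Int) Int) (h : t.keys.Nodup) :
    (pvCounterAdd t u).keys.Nodup :=
  PySem.Dict.nodup_keys_foldl_modify_key u.items Prod.fst 0 (fun _ q => (· + q.2)) t h

theorem pvTotalGetD (table : PySem.Dict Int (PySem.Dict (Int × Int) Int))
    (hval : ∀ a, (table.getD a PySem.Dict.empty).keys.Nodup) (L : List Int) :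
    ∀ (t0 : PySem.Dict (Int × Int) Int) (e : Int × Int),
    (L.foldl (fun t a => pvCounterAdd t (table.getD a PySem.Dict.empty)) t0).getD e 0 =
      t0.getD e 0 + (L.map (fun a => (table.getD a PySem.Dict.empty).getD e 0)).sum := by
  induction L with
  | nil => intro t0 e; simp
  | cons a rest ih =>
    intro t0 e
    simp only [List.foldl_cons, List.map_cons, List.sum_cons]
    rw [ih, pvCounterAdd_getD _ _ (hval a)]
    ring

theorem pvTotalNodup (table : PySem.Dict Int (PySem.Dict (Int × Int) Int)) (L : List Int) :
    ∀ (t0 : PySem.Dict (Int × Int) Int), t0.keys.Nodup →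
    (L.foldl (fun t a => pvCounterAdd t (table.getD a PySem.Dict.empty)) t0).keys.Nodup := by
  induction L with
  | nil => exact fun t0 h => h
  | cons a rest ih => exact fun t0 h => ih _ (pvCounterAdd_nodup _ _ h)

-- membership in the filtered candidate list = counted at least nI times
theorem pvCandsMem (total : PySem.Dict (Int × Int) Int) (hnd : total.keys.Nodup)
    (nI : Int) (hpos : 1 ≤ nI) (e : Int × Int) :
    (e ∈ (total.items.filter (fun q => nI ≤ q.2)).map (·.1)) ↔ nI ≤ total.getD e 0 := by
  constructor
  · intro h
    rcases List.mem_map.mp h with ⟨q, hq, hq1⟩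
    rcases List.mem_filter.mp hq with ⟨hqi, hqv⟩
    have := PySem.Dict.getD_of_mem_items (d := total) (k := q.1) (v := q.2) hqi hnd (d0 := 0)
    rw [← hq1, this]
    exact of_decide_eq_true hqv
  · intro h
    have hget : total.get? e = some (total.getD e 0) := by
      cases hg : total.get? e with
      | none =>
        exfalso
        rw [PySem.Dict.getD_eq_get?_getD, hg] at h
        simp at h
        omega
      | some v => rw [PySem.Dict.getD_eq_get?_getD, hg]; rfl
    have hmem := PySem.Dict.mem_items_of_get?_eq_some (d := total) hget
    refine List.mem_map.mpr ⟨(e, total.getD e 0), List.mem_filter.mpr ⟨hmem, ?_⟩, rfl⟩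
    exact decide_eq_true h

-- Python's min over (int, int) tuples: the returned element is a lexicographic minimum
theorem pvELtb2_iff (a b : Int × Int) :
    (decide (a.1 < b.1) || !decide (b.1 < a.1) && decide (a.2 < b.2)) = true ↔ pvELt a b := by
  rcases a with ⟨x, y⟩; rcases b with ⟨z, w⟩
  simp [pvELt]
  omega

theorem pvMin2_cons_cons (m y : Int × Int) (ys : List (Int × Int)) :
    PySem.List.min2? (m :: y :: ys) (·.1) (·.2) =
      PySem.List.min2?
        ((if (decide (y.1 < m.1) || !decide (m.1 < y.1) && decide (y.2 < m.2)) = true then y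
          else m) :: ys) (·.1) (·.2) := by
  by_cases h : (decide (y.1 < m.1) || !decide (m.1 < y.1) && decide (y.2 < m.2)) = true
  · rw [if_pos h]
    simp only [PySem.List.min2?, List.foldl_cons]
    rw [show (if (decide (y.1 < m.1) || !decide (m.1 < y.1) && decide (y.2 < m.2)) = true then
      some y else some m) = some y from if_pos h]
  · rw [if_neg h]
    simp only [PySem.List.min2?, List.foldl_cons]
    rw [show (if (decide (y.1 < m.1) || !decide (m.1 < y.1) && decide (y.2 < m.2)) = true then
      some y else some m) = some m from if_neg h]

theorem pvMin2Spec (t : List (Int × Int)) :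
    ∀ x, ∃ m, PySem.List.min2? (x :: t) (·.1) (·.2) = some m ∧ m ∈ x :: t ∧
      ∀ y ∈ x :: t, pvELe m y := by
  induction t with
  | nil =>
    intro x
    refine ⟨x, rfl, by simp, ?_⟩
    intro y hy
    rcases List.mem_singleton.mp hy with rfl
    exact pvELe_refl _
  | cons y ys ih =>
    intro x
    rw [pvMin2_cons_cons]
    by_cases h : (decide (y.1 < x.1) || !decide (x.1 < y.1) && decide (y.2 < x.2)) = true
    · rw [if_pos h] at *
      have hlt : pvELt y x := (pvELtb2_iff y x).mp h
      rcases ih y with ⟨m, hm, hmem, hmin⟩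
      refine ⟨m, hm, ?_, ?_⟩
      · rcases List.mem_cons.mp hmem with he | hmem'
        · rw [he]; simp
        · simp [hmem']
      · intro z hz
        rcases List.mem_cons.mp hz with he | hz'
        · rw [he]
          exact pvELe_trans (hmin y List.mem_cons_self) (pvELe_of_lt hlt)
        · exact hmin z hz'
    · rw [if_neg h] at *
      have hge : pvELe x y := pvELe_of_not_lt (fun hlt => h ((pvELtb2_iff y x).mpr hlt))
      rcases ih x with ⟨m, hm, hmem, hmin⟩
      refine ⟨m, hm, ?_, ?_⟩
      · rcases List.mem_cons.mp hmem with he | hmem'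
        · rw [he]; simp
        · simp [hmem']
      · intro z hz
        rcases List.mem_cons.mp hz with he | hz'
        · rw [he]
          exact hmin x List.mem_cons_self
        · rcases List.mem_cons.mp hz' with he2 | hz''
          · rw [he2]
            exact pvELe_trans (hmin x List.mem_cons_self) hge
          · exact hmin z (List.mem_cons_of_mem _ hz'')


-- ---- glue: sorted buckets, pool counts, and the per-setlist equality ----

theorem pvELtb2_asymm (a b : Int × Int)
    (h : (decide (a.1 < b.1) || !decide (b.1 < a.1) && decide (a.2 < b.2)) = true) :
    (decide (b.1 < a.1) || !decide (a.1 < b.1) && decide (b.2 < a.2)) = false := by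
  cases hba : (decide (b.1 < a.1) || !decide (a.1 < b.1) && decide (b.2 < a.2)) with
  | false => rfl
  | true => exact absurd ((pvELtb2_iff b a).mp hba) (pvELt_asymm ((pvELtb2_iff a b).mp h))

theorem pvSorted2_pairwise (xs : List (Int × Int)) :
    (PySem.List.sorted2 xs (·.1) (·.2)).Pairwise pvELe := by
  have heq : PySem.List.sorted2 xs (·.1) (·.2) =
      xs.foldl (fun acc x => PySem.List.insertBy
        (fun a b => decide (a.1 < b.1) || !decide (b.1 < a.1) && decide (a.2 < b.2)) x acc)
        [] := rfl
  rw [heq]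
  have hp := pvFoldInsertBy_pairwise
    (fun a b => decide (a.1 < b.1) || !decide (b.1 < a.1) && decide (a.2 < b.2))
    (fun a b hab => pvELtb2_asymm a b hab)
    (fun a b c hab hbc => (pvELtb2_iff a c).mpr
      (pvELt_trans ((pvELtb2_iff a b).mp hab) ((pvELtb2_iff b c).mp hbc)))
    xs [] (by simp)
  exact hp.imp (fun {a b} h => pvELe_of_not_lt (fun hlt => by
    have h' : (decide (b.1 < a.1) || !decide (a.1 < b.1) && decide (b.2 < a.2)) = false := h
    rw [(pvELtb2_iff b a).mpr hlt] at h'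
    exact Bool.true_eq_false.mp h'))

theorem pvSorted2_count (xs : List (Int × Int)) (e : Int × Int) :
    (PySem.List.sorted2 xs (·.1) (·.2)).count e = xs.count e :=
  (PySem.List.sorted2_perm xs _ _ false).count_eq e

theorem pvFlattenCount (L : List Int) (f : Int → List (Int × Int)) (e : Int × Int) :
    ((L.map f).flatten).count e = (L.map (fun a => (f a).count e)).sum := by
  induction L with
  | nil => simp
  | cons a t ih => simp [List.count_append, ih]

theorem pvSumGeLen (L : List Int) (g : Int → Nat) (h : ∀ a ∈ L, 1 ≤ g a) :
    L.length ≤ (L.map g).sum := by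
  induction L with
  | nil => simp
  | cons a t ih =>
    have h1 := h a (by simp)
    have h2 := ih (fun b hb => h b (by simp [hb]))
    simp only [List.length_cons, List.map_cons, List.sum_cons]
    omega

-- the value each port appends for one enumerated setlist
def pvOutA (S : List (List Int)) (p : Int × List Int) : Int × Int :=
  (p.1, (PySem.List.pyGetD
    (pvMergeLoop (p.2.map (fun element => (pvTableASorted S).getD element [])) p.2.length
      (((p.2.map (fun element => (pvTableASorted S).getD element [])).map List.length).sum + 1)
      (pvHeapify
        ((PySem.List.enumerate (p.2.map (fun element => (pvTableASorted S).getD element []))).map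
          (fun q => (PySem.List.pyGetD q.2 0 (0, 0), q.1, (0 : Int))))) [])
    0 (0, 0)).2)

def pvOutB (S : List (List Int)) (p : Int × List Int) : Int × Int :=
  (p.1, ((PySem.List.min2?
    (((p.2.foldl
        (fun t element => pvCounterAdd t ((pvTableB S).getD element PySem.Dict.empty))
        PySem.Dict.empty).items.filter
      (fun q => (p.2.length : Int) ≤ q.2)).map (·.1)) (·.1) (·.2)).getD (0, 0)).2)

theorem pvPerItem (S : List (List Int)) (hpre : ∀ L' ∈ S, L' ≠ []) (p : Int × List Int)
    (hmem : p ∈ PySem.List.enumerate S) : pvOutA S p = pvOutB S p := by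
  unfold pvOutA pvOutB
  have hLmem : p.2 ∈ S := by
    rcases (PySem.List.mem_enumerate_iff S 0 p).mp hmem with ⟨k, hk, hp⟩
    rw [hp]
    exact List.getElem_mem hk
  have hLne : p.2 ≠ [] := hpre p.2 hLmem
  have hn : 1 ≤ p.2.length := List.length_pos_of_ne_nil hLne
  -- the buckets the merge walks over
  set bs := p.2.map (fun element => (pvTableASorted S).getD element []) with hbsdef
  have hS : ∀ bucket ∈ bs, bucket.Pairwise pvELe := by
    intro bucket hb
    rcases List.mem_map.mp hb with ⟨a, _, rfl⟩
    rw [pvSortedGetD]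
    exact pvSorted2_pairwise _
  have hcntb : ∀ e, (bs.flatten).count e =
      (p.2.map (fun a => ((pvTableA S).getD a []).count e)).sum := by
    intro e
    rw [hbsdef, pvFlattenCount]
    congr 1
    apply List.map_congr_left
    intro a _
    rw [pvSortedGetD, pvSorted2_count]
  -- the setlist's own entry reaches every bucket at least once
  have hterm : ∀ a ∈ p.2, p.2.count a ≤
      ((pvTableA S).getD a []).count (-(p.2.length : Int), p.1) := by
    intro a _
    have h1 : ((pvTableA S).getD a []).count (-(p.2.length : Int), p.1) =
        ((PySem.List.enumerate S).map (pvW a (-(p.2.length : Int), p.1))).sum := by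
      unfold pvTableA
      rw [pvRawCnt]
      simp
    have h2 : pvW a (-(p.2.length : Int), p.1) p = p.2.count a := by
      unfold pvW
      rw [if_pos rfl]
    have h3 : pvW a (-(p.2.length : Int), p.1) p ≤
        ((PySem.List.enumerate S).map (pvW a (-(p.2.length : Int), p.1))).sum :=
      List.single_le_sum (fun x _ => Nat.zero_le x) _ (List.mem_map_of_mem hmem)
    omega
  have he₀ : p.2.length ≤ bs.flatten.count (-(p.2.length : Int), p.1) := by
    rw [hcntb]
    have h1 : p.2.length ≤ (p.2.map (fun a => p.2.count a)).sum :=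
      pvSumGeLen p.2 _ (fun a ha => List.count_pos_iff.mpr ha)
    have h2 : (p.2.map (fun a => p.2.count a)).sum ≤
        (p.2.map (fun a => ((pvTableA S).getD a []).count (-(p.2.length : Int), p.1))).sum :=
      List.sum_le_sum (fun a ha => by simpa using hterm a (by simpa using ha))
    omega
  have hbne : ∀ bucket ∈ bs, bucket ≠ [] := by
    intro bucket hb
    rcases List.mem_map.mp hb with ⟨a, ha, rfl⟩
    rw [pvSortedGetD]
    intro hnil
    have hc := hterm a ha
    rw [← pvSorted2_count ((pvTableA S).getD a []) (-(p.2.length : Int), p.1), hnil] at hc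
    have := List.count_pos_iff.mpr ha
    simp at hc
    omega
  -- run the loop lemma from the initial state
  have hremlen : (pvRemain 0 bs (List.replicate bs.length 0)).length = bs.flatten.length := by
    have h1 := congrArg List.length (pvRemain_zero_map_fst bs 0)
    simpa using h1
  have hloop := pvLoopMain bs p.2.length hS hn (-(p.2.length : Int), p.1) he₀
    ((bs.map List.length).sum + 1) (List.replicate bs.length 0) []
    (pvHeapify ((PySem.List.enumerate bs).map
      (fun q => (PySem.List.pyGetD q.2 0 (0, 0), q.1, (0 : Int)))))
    (by simp)
    (by rw [hremlen, List.length_flatten]; omega)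
    (pvHeapify_pairwise _)
    ((pvHeapify_perm _).trans (by rw [pvFrontier_zero bs hbne 0]))
    (by simp)
    (by simp)
    (by intro e; rw [pvRemain_zero_map_fst bs 0]; simp)
    (by intro e h; exfalso; simp only [List.map_nil, List.count_nil] at h; omega)
  simp only [List.map_nil, List.drop_nil, List.length_nil] at hloop
  obtain ⟨hA1, hA2⟩ := hloop
  -- B's summed counter agrees with the pool counts
  set total := p.2.foldl
    (fun t element => pvCounterAdd t ((pvTableB S).getD element PySem.Dict.empty))
    PySem.Dict.empty with htotdef
  have htot : ∀ e, total.getD e 0 = (bs.flatten.count e : Int) := by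
    intro e
    rw [htotdef, pvTotalGetD (pvTableB S) (pvValsNodupB S) p.2]
    have h1 : (p.2.map (fun a => ((pvTableB S).getD a PySem.Dict.empty).getD e 0)) =
        p.2.map (fun a => (((pvTableA S).getD a []).count e : Int)) :=
      List.map_congr_left (fun a _ => pvTblEq S a e)
    rw [h1, hcntb e, Nat.cast_list_sum, List.map_map]
    simp [Function.comp_def]
  have hndtot : total.keys.Nodup :=
    pvTotalNodup (pvTableB S) p.2 PySem.Dict.empty PySem.Dict.nodup_keys_empty
  have hcand : ∀ e, e ∈ ((total.items.filter
      (fun q => (p.2.length : Int) ≤ q.2)).map (·.1)) ↔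
      p.2.length ≤ bs.flatten.count e := by
    intro e
    rw [pvCandsMem total hndtot (p.2.length : Int) (by exact_mod_cast hn) e, htot e]
    exact_mod_cast Iff.rfl
  -- the two minima coincide
  set mA := PySem.List.pyGetD
    (pvMergeLoop bs p.2.length ((bs.map List.length).sum + 1)
      (pvHeapify ((PySem.List.enumerate bs).map
        (fun q => (PySem.List.pyGetD q.2 0 (0, 0), q.1, (0 : Int))))) [])
    0 (0, 0) with hmAdef
  have hmAin : mA ∈ ((total.items.filter (fun q => (p.2.length : Int) ≤ q.2)).map (·.1)) :=
    (hcand mA).mpr hA1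
  rcases hc : ((total.items.filter (fun q => (p.2.length : Int) ≤ q.2)).map (·.1)) with
    _ | ⟨x, tl⟩
  · rw [hc] at hmAin
    simp at hmAin
  · rcases pvMin2Spec tl x with ⟨mB, hmB, hmBmem, hmBmin⟩
    have hle1 : pvELe mA mB := hA2 mB ((hcand mB).mp (by rw [hc]; exact hmBmem))
    have hle2 : pvELe mB mA := hmBmin mA (by rw [hc] at hmAin; exact hmAin)
    have heq : mB = mA := pvELe_antisymm hle2 hle1
    rw [hc, hmB, heq]
    rfl


-- ===== VERDICT (by name: the statement is the Claim_ definition above) =====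
theorem LargestSupersets_spec : Claim_equal_LargestSupersets := by
  intro S hdom hpre
  unfold Spec_LargestSupersets
  have hA : LargestSupersets S = (PySem.List.enumerate S).map (pvOutA S) := by
    unfold LargestSupersets
    exact (PySem.List.foldl_append_singleton_eq_map (pvOutA S)
      (PySem.List.enumerate S) []).trans (List.nil_append _)
  have hB : LargestSupersets_alt S = (PySem.List.enumerate S).map (pvOutB S) := by
    unfold LargestSupersets_alt
    exact (PySem.List.foldl_append_singleton_eq_map (pvOutB S)
      (PySem.List.enumerate S) []).trans (List.nil_append _)
  rw [hA, hB]
  exact List.map_congr_left (fun p hp => pvPerItem S hpre p hp)
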